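-- pv_equiv track=rewrite | github.com/KatTayar/Python_Class | UtilityFunctions.py | addBefore
-- ===== SOURCE A (Python) =====
-- def addBefore(s, symbol):
--     new_s = ''
--     for c in s:
--         if c == ' ':
--             new_s += ' '
--         else:
--             new_s += symbol + c
--     return new_s
-- ===== SOURCE B (Python) =====
-- def addBefore(s, symbol):
--     return ' '.join(''.join(symbol + c for c in word) for word in s.split(' '))
-- ===== Notes on version B (the rewrite author's own statement) =====
-- stated objective: idiomatic
-- what changed: Replaces the flat per-character loop with space/non-space branching by split(' ') into words, a per-word join that prepends symbol before each character, and a ' '.join of the transformed words.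
import Mathlib
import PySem

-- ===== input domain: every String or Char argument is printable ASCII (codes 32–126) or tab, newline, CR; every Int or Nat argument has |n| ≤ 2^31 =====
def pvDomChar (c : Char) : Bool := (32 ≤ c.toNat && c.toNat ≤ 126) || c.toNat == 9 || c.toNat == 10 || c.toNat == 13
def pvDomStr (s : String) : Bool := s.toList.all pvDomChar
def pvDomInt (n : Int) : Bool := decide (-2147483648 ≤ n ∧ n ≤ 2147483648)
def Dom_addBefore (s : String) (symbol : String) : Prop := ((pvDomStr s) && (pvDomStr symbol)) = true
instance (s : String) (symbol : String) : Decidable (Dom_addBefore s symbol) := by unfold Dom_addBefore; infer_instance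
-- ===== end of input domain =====

-- B replaces A's flat per-character loop by split(' ') / per-word transform / ' '.join (idiomatic decomposition; same cost).


-- ===== PORT A =====
-- for c in s: new_s += ' '  if c == ' '  else  symbol + c
def addBefore (s : String) (symbol : String) : String :=
  String.ofList (s.toList.foldl
    (fun acc c => if c == ' ' then acc ++ [' '] else acc ++ symbol.toList ++ [c]) [])

-- ===== PORT B =====
-- ''.join(symbol + c for c in word): prepend symbol before every char of a word
def addBeforeWord (symbol : List Char) (w : List Char) : List Char :=
  w.flatMap (fun c => symbol ++ [c])

-- ' '.join(... for word in s.split(' '))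
def addBefore_alt (s : String) (symbol : String) : String :=
  String.ofList (PySem.Chars.join [' ']
    ((PySem.Chars.splitOn s.toList [' ']).map (addBeforeWord symbol.toList)))

-- ===== PRECONDITION & SPEC =====
def Spec_addBefore (s : String) (symbol : String) (out : String) : Prop := out = addBefore_alt s symbol
instance (s : String) (symbol : String) (out : String) : Decidable (Spec_addBefore s symbol out) := by unfold Spec_addBefore; infer_instance

-- ===== CLAIM (what is proved, stated in full; the proofs are below) =====
def Claim_equal_addBefore : Prop := ∀ (s : String) (symbol : String), Dom_addBefore s symbol → Spec_addBefore s symbol (addBefore s symbol)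

-- ===== LEMMAS AND PROOFS =====

-- recursive form of A's loop body (output only)
def gA (sym : List Char) : List Char → List Char
  | [] => []
  | c :: cs => (if c = ' ' then [' '] else sym ++ [c]) ++ gA sym cs

theorem foldl_eq_gA (sym : List Char) (cs : List Char) (acc : List Char) :
    cs.foldl (fun acc c => if c == ' ' then acc ++ [' '] else acc ++ sym ++ [c]) acc
      = acc ++ gA sym cs := by
  induction cs generalizing acc with
  | nil => simp [gA]
  | cons c cs ih =>
    simp only [List.foldl_cons, gA, ih]
    by_cases h : c = ' ' <;> simp [h]

-- hand split on single ' ' with a "current word" accumulator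
def parts : List Char → List Char → List (List Char)
  | cur, [] => [cur.reverse]
  | cur, c :: rest => if c = ' ' then cur.reverse :: parts [] rest else parts (c :: cur) rest

theorem parts_ne_nil (cur l : List Char) : parts cur l ≠ [] := by
  induction l generalizing cur with
  | nil => simp [parts]
  | cons c rest ih => by_cases h : c = ' ' <;> simp [parts, h, ih]

theorem splitOn_go_eq (fuel : Nat) (l cur : List Char) (acc : List (List Char))
    (h : l.length ≤ fuel) :
    PySem.Chars.splitOn.go [' '] fuel l cur acc = acc.reverse ++ parts cur l := by
  induction fuel generalizing l cur acc with
  | zero =>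
    have : l = [] := by simpa using List.length_eq_zero_iff.mp (Nat.le_zero.mp h)
    subst this
    simp [PySem.Chars.splitOn.go, parts]
  | succ n ih =>
    cases l with
    | nil => simp [PySem.Chars.splitOn.go, parts]
    | cons c rest =>
      have h' : rest.length ≤ n := by simpa using Nat.le_of_succ_le_succ h
      by_cases hc : c = ' '
      · subst hc
        simp only [PySem.Chars.splitOn.go]
        rw [if_pos (by simp [List.isPrefixOf])]
        simp only [List.length_cons, List.length_nil, List.drop_succ_cons, List.drop_zero]
        rw [ih rest [] (cur.reverse :: acc) h']
        simp [parts]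
      · simp only [PySem.Chars.splitOn.go]
        rw [if_neg (by simp [List.isPrefixOf]; intro h2; exact hc h2.symm)]
        rw [ih rest (c :: cur) acc h']
        simp [parts, hc]

theorem splitOn_eq_parts (cs : List Char) :
    PySem.Chars.splitOn cs [' '] = parts [] cs := by
  have := splitOn_go_eq (cs.length + 1) cs [] [] (Nat.le_succ _)
  simpa [PySem.Chars.splitOn] using this

theorem join_cons_of_ne_nil (sep p : List Char) (rest : List (List Char)) (h : rest ≠ []) :
    PySem.Chars.join sep (p :: rest) = p ++ sep ++ PySem.Chars.join sep rest := by
  cases rest with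
  | nil => exact absurd rfl h
  | cons q r => exact PySem.Chars.join_cons_cons sep p q r

theorem join_parts (sym : List Char) (l cur : List Char) :
    PySem.Chars.join [' '] ((parts cur l).map (addBeforeWord sym))
      = addBeforeWord sym cur.reverse ++ gA sym l := by
  induction l generalizing cur with
  | nil => simp [parts, gA, PySem.Chars.join_singleton]
  | cons c rest ih =>
    by_cases hc : c = ' '
    · subst hc
      have hp : parts cur (' ' :: rest) = cur.reverse :: parts [] rest := by simp [parts]
      have hg : gA sym (' ' :: rest) = ' ' :: gA sym rest := by simp [gA]
      rw [hp, hg, List.map_cons,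
          join_cons_of_ne_nil _ _ _ (by simp [List.map_eq_nil_iff, parts_ne_nil]), ih []]
      simp [addBeforeWord]
    · have hp : parts cur (c :: rest) = parts (c :: cur) rest := by simp [parts, hc]
      have hg : gA sym (c :: rest) = (sym ++ [c]) ++ gA sym rest := by simp [gA, hc]
      rw [hp, hg, ih (c :: cur)]
      simp [addBeforeWord]

-- ===== VERDICT (by name: the statement is the Claim_ definition above) =====
theorem addBefore_spec : Claim_equal_addBefore := by
  intro s symbol _
  unfold Spec_addBefore addBefore addBefore_alt
  rw [foldl_eq_gA, splitOn_eq_parts, join_parts]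
  simp [addBeforeWord]
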